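-- pv_equiv track=rewrite | github.com/Fedefirewall/Algorithms-for-truck-and-drone-delivery | Genetic Algorithm/Genetic Algorithm.py | solution_duplicated_OLD
-- ===== SOURCE A (Python) =====
-- def contains(small, big):
--     for i in range(len(big)-len(small)+1):
--         for j in range(len(small)):
--             if big[i+j] != small[j]:
--                 break
--         else:
--             return True
--     return False
--
-- def solution_duplicated_OLD(population,solution_input):
--
--     #scorro tutte le soliuzoni
--     for solution in population:
--
--         flag=0
--         #scorro tutti i percorsi e li duplico(truck, drone1,drone2)
--         for path in solution:
--
--             path=path*2
--             #scorro tutti i percorsi in questa soluzione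
--             for path_input in solution_input:
--                 #controllo se é una sotto lista
--                 if(contains(path_input,path) and len(path_input)==(len(path)/2) ):
--                     flag+=1
--                     # se é sottolista posso smettere di ciclare e cambiare path2
--                     break
--             #se dato path, nessun path_input ha fatto flag su questo path, allora sicuramente questa soluzione é diversa
--             else:
--                 break
--         #se flag=15 allora ogni path é in path2, quindi la soluzione é uguale
--         if flag==len(solution):
--             return True
--     #se sono qua ogni soluzione aveva almeno un path che nopn era contentenuto in nessun path2, flag<15
--     return False
--
-- i=1
-- ===== SOURCE B (Python) =====
-- def solution_duplicated_OLD(population, solution_input):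
--     # hash-set of input paths removes the inner scan over solution_input:
--     # a path matches iff one of its rotations is an input path
--     index = set(map(tuple, solution_input))
--
--     def matched(path):
--         if not path:
--             return () in index
--         return any(tuple(path[k:] + path[:k]) in index for k in range(len(path)))
--
--     return any(all(matched(p) for p in sol) for sol in population)
-- ===== Notes on version B (the rewrite author's own statement) =====
-- stated objective: faster
-- what changed: B builds one hash-set of the input paths and tests each population path by probing the set with its rotations, replacing A's inner scan of solution_input with a naive contains on the doubled path and its flag/break-else control flow with any/all.
import Mathlib
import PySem

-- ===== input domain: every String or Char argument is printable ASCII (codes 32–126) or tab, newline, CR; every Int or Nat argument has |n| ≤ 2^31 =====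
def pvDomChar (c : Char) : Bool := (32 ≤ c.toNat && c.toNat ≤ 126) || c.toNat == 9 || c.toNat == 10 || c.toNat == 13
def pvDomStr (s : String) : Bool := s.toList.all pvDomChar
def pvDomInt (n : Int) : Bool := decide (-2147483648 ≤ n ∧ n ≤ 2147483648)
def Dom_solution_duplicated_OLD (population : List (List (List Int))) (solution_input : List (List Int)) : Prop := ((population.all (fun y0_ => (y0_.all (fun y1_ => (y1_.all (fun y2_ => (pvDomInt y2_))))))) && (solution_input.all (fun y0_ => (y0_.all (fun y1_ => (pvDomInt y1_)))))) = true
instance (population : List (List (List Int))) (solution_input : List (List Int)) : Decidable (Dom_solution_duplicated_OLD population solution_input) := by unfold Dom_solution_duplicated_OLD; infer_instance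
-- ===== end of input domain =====

-- B replaces A's inner scan of solution_input (naive contains on the doubled path) by one
-- hash-set of the input paths, probed with each rotation of the path (objective: faster).

-- ===== PORT A =====
-- inner 'for j' loop of contains (for-else: completing = match); both indices are in
-- range whenever the loop runs, so comparing the pyGet? options is exact
def containsJ (small big : List Int) (i : Int) : List Int → Bool
  | [] => true
  | j :: js =>
    if PySem.List.pyGet? big (i + j) ≠ PySem.List.pyGet? small j then false
    else containsJ small big i js

-- outer 'for i' loop of contains
def containsI (small big : List Int) : List Int → Bool
  | [] => false
  | i :: is =>
    if containsJ small big i (PySem.List.pyRange 0 small.length 1) then true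
    else containsI small big is

def containsA (small big : List Int) : Bool :=
  containsI small big (PySem.List.pyRange 0 ((big.length : Int) - (small.length : Int) + 1) 1)

-- 'for path_input in solution_input' with its break (flag += 1 ≡ one match found)
-- len(path_input) == len(path2)/2 : len(path2) is always even, so this is 2*len(path_input) == len(path2)
def anyInput (path2 : List Int) : List (List Int) → Bool
  | [] => false
  | pi :: rest =>
    if containsA pi path2 && (pi.length * 2 == path2.length) then true
    else anyInput path2 rest

-- 'for path in solution' with flag and the for-else break
def pathsLoop (solution_input : List (List Int)) (flag : Int) : List (List Int) → Int
  | [] => flag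
  | path :: rest =>
    let path2 := path ++ path
    if anyInput path2 solution_input then pathsLoop solution_input (flag + 1) rest
    else flag

def solsLoop (solution_input : List (List Int)) : List (List (List Int)) → Bool
  | [] => false
  | sol :: rest =>
    if pathsLoop solution_input 0 sol == (sol.length : Int) then true
    else solsLoop solution_input rest

def solution_duplicated_OLD (population : List (List (List Int))) (solution_input : List (List Int)) : Bool :=
  solsLoop solution_input population

-- ===== PORT B =====
-- matched(path) from Source B: probe the set with every rotation path[k:]+path[:k]
def matchedB (index : PySem.Set (List Int)) (p : List Int) : Bool :=
  if p = [] then PySem.Set.contains index []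
  else (PySem.List.pyRange 0 (p.length : Int) 1).any (fun k =>
    PySem.Set.contains index
      (PySem.List.slice p (some k) none ++ PySem.List.slice p none (some k)))

def solution_duplicated_OLD_alt (population : List (List (List Int))) (solution_input : List (List Int)) : Bool :=
  let index := PySem.Set.ofList solution_input
  population.any (fun sol => sol.all (fun p => matchedB index p))

-- ===== PRECONDITION & SPEC =====
def Spec_solution_duplicated_OLD (population : List (List (List Int))) (solution_input : List (List Int)) (out : Bool) : Prop := out = solution_duplicated_OLD_alt population solution_input
instance (population : List (List (List Int))) (solution_input : List (List Int)) (out : Bool) : Decidable (Spec_solution_duplicated_OLD population solution_input out) := by unfold Spec_solution_duplicated_OLD; infer_instance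

-- ===== CLAIM (what is proved, stated in full; the proofs are below) =====
def Claim_equal_solution_duplicated_OLD : Prop := ∀ (population : List (List (List Int))) (solution_input : List (List Int)), Dom_solution_duplicated_OLD population solution_input → Spec_solution_duplicated_OLD population solution_input (solution_duplicated_OLD population solution_input)

-- ===== LEMMAS AND PROOFS =====

theorem containsJ_iff (small big : List Int) (i : Int) (js : List Int) :
    containsJ small big i js = true ↔
      ∀ j ∈ js, PySem.List.pyGet? big (i + j) = PySem.List.pyGet? small j := by
  induction js with
  | nil => simp [containsJ]
  | cons j js ih =>
    simp only [containsJ]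
    split_ifs with h
    · simp [h]
    · rw [not_ne_iff] at h
      simp [ih, h]

theorem containsI_iff (small big : List Int) (is : List Int) :
    containsI small big is = true ↔
      ∃ i ∈ is, containsJ small big i (PySem.List.pyRange 0 small.length 1) = true := by
  induction is with
  | nil => simp [containsI]
  | cons i is ih =>
    simp only [containsI]
    split_ifs with h
    · simp [h]
    · simp [ih, h]

-- occurrence at a natural position i (i + |small| ≤ |big|) is slice equality
theorem containsJ_nat_iff (small big : List Int) (n : Nat) (hn : n + small.length ≤ big.length) :
    containsJ small big (n : Int) (PySem.List.pyRange 0 small.length 1) = true ↔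
      (big.drop n).take small.length = small := by
  rw [containsJ_iff]
  constructor
  · intro h
    apply List.ext_getElem
    · simp; omega
    · intro k hk1 hk2
      have hk : k < small.length := by simpa using hk2
      have := h (k : Int) (by simp [PySem.List.mem_pyRange_one]; omega)
      rw [show (n : Int) + (k : Int) = ((n + k : Nat) : Int) by push_cast; ring] at this
      rw [PySem.List.pyGet?_natCast, PySem.List.pyGet?_natCast,
        List.getElem?_eq_getElem (by omega), List.getElem?_eq_getElem (by omega)] at this
      simp only [Option.some.injEq] at this
      simpa [List.getElem_take, List.getElem_drop] using this
  · intro h j hj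
    rw [PySem.List.mem_pyRange_one] at hj
    obtain ⟨k, rfl⟩ : ∃ k : Nat, j = (k : Int) := ⟨j.toNat, (Int.toNat_of_nonneg hj.1).symm⟩
    have hk : k < small.length := by exact_mod_cast hj.2
    rw [show (n : Int) + (k : Int) = ((n + k : Nat) : Int) by push_cast; ring]
    rw [PySem.List.pyGet?_natCast, PySem.List.pyGet?_natCast,
      List.getElem?_eq_getElem (by omega), List.getElem?_eq_getElem (by omega)]
    have : ((big.drop n).take small.length)[k]'(by simp; omega) = small[k] := by
      simp only [h]
    simpa [List.getElem_take, List.getElem_drop] using this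

theorem containsA_iff (small big : List Int) :
    containsA small big = true ↔
      ∃ n : Nat, n + small.length ≤ big.length ∧ (big.drop n).take small.length = small := by
  rw [containsA, containsI_iff]
  constructor
  · rintro ⟨i, hi, hcj⟩
    rw [PySem.List.mem_pyRange_one] at hi
    obtain ⟨n, rfl⟩ : ∃ k : Nat, i = (k : Int) := ⟨i.toNat, (Int.toNat_of_nonneg hi.1).symm⟩
    have hn : n + small.length ≤ big.length := by
      have := hi.2; omega
    exact ⟨n, hn, (containsJ_nat_iff small big n hn).1 hcj⟩
  · rintro ⟨n, hn, hs⟩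
    refine ⟨(n : Int), ?_, (containsJ_nat_iff small big n hn).2 hs⟩
    rw [PySem.List.mem_pyRange_one]
    omega

-- the doubled-path slice at n ≤ |p| is the rotation by n
theorem slice_double (p : List Int) (n : Nat) (hn : n ≤ p.length) :
    ((p ++ p).drop n).take p.length = p.drop n ++ p.take n := by
  rw [List.drop_append, List.take_append]
  have h1 : (n - p.length) = 0 := by omega
  have h2 : (p.drop n).length = p.length - n := by simp
  rw [h1, h2]
  simp [show p.length - (p.length - n) = n by omega]

theorem matchedB_iff (si : List (List Int)) (p : List Int) :
    matchedB (PySem.Set.ofList si) p = true ↔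
      (p = [] ∧ [] ∈ si) ∨ ∃ k : Nat, k < p.length ∧ p.drop k ++ p.take k ∈ si := by
  unfold matchedB
  split_ifs with hp
  · subst hp
    simp [PySem.Set.contains, PySem.Set.mem_ofList]
  · simp only [List.any_eq_true]
    constructor
    · rintro ⟨k, hk, hc⟩
      rw [PySem.List.mem_pyRange_one] at hk
      obtain ⟨n, rfl⟩ : ∃ m : Nat, k = (m : Int) := ⟨k.toNat, (Int.toNat_of_nonneg hk.1).symm⟩
      have hn : n < p.length := by exact_mod_cast hk.2
      right
      refine ⟨n, hn, ?_⟩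
      rw [PySem.List.slice_from_natCast, PySem.List.slice_to_natCast] at hc
      simpa [PySem.Set.contains, PySem.Set.mem_ofList] using hc
    · rintro (⟨rfl, _⟩ | ⟨n, hn, hm⟩)
      · exact absurd rfl hp
      · refine ⟨(n : Int), ?_, ?_⟩
        · rw [PySem.List.mem_pyRange_one]; omega
        · rw [PySem.List.slice_from_natCast, PySem.List.slice_to_natCast]
          simpa [PySem.Set.contains, PySem.Set.mem_ofList] using hm

theorem anyInput_iff (p : List Int) (si : List (List Int)) :
    anyInput (p ++ p) si = true ↔
      ∃ pi ∈ si, containsA pi (p ++ p) = true ∧ pi.length = p.length := by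
  induction si with
  | nil => simp [anyInput]
  | cons pi rest ih =>
    simp only [anyInput]
    split_ifs with h
    · simp only [Bool.and_eq_true, beq_iff_eq] at h
      have hl : pi.length = p.length := by have := h.2; simp at this; omega
      simp only [true_iff]
      exact ⟨pi, by simp, h.1, hl⟩
    · rw [Bool.and_eq_true, beq_iff_eq] at h
      push Not at h
      rw [ih]
      constructor
      · rintro ⟨q, hq, hc, hl⟩; exact ⟨q, by simp [hq], hc, hl⟩
      · rintro ⟨q, hq, hc, hl⟩
        rcases List.mem_cons.1 hq with rfl | hq
        · exfalso
          have := h hc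
          simp at this
          omega
        · exact ⟨q, hq, hc, hl⟩

-- the per-path equivalence: A's scan of solution_input equals B's rotation probes
theorem anyInput_eq_matchedB (p : List Int) (si : List (List Int)) :
    anyInput (p ++ p) si = matchedB (PySem.Set.ofList si) p := by
  rcases Bool.eq_false_or_eq_true (matchedB (PySem.Set.ofList si) p) with hb | hb <;> rw [hb]
  · rw [anyInput_iff]
    rw [matchedB_iff] at hb
    rcases hb with ⟨rfl, hmem⟩ | ⟨k, hk, hmem⟩
    · refine ⟨[], hmem, ?_, rfl⟩
      rw [containsA_iff]
      exact ⟨0, by simp, by simp⟩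
    · refine ⟨p.drop k ++ p.take k, hmem, ?_, by simp; omega⟩
      rw [containsA_iff]
      refine ⟨k, by simp; omega, ?_⟩
      rw [show (p.drop k ++ p.take k).length = p.length by simp; omega,
        slice_double p k (le_of_lt hk)]
  · rw [Bool.eq_false_iff, Ne, anyInput_iff]
    rw [Bool.eq_false_iff, Ne, matchedB_iff] at hb
    rintro ⟨pi, hmem, hc, hl⟩
    apply hb
    rw [containsA_iff] at hc
    obtain ⟨n, hn, hs⟩ := hc
    have hnp : n ≤ p.length := by simp at hn; omega
    rw [hl, slice_double p n hnp] at hs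
    by_cases hp : p = []
    · subst hp
      left
      simp at hs
      exact ⟨rfl, hs ▸ hmem⟩
    · right
      by_cases hnl : n < p.length
      · exact ⟨n, hnl, hs ▸ hmem⟩
      · have : n = p.length := by omega
        subst this
        refine ⟨0, by cases p <;> simp_all, ?_⟩
        have heq : p.drop p.length ++ p.take p.length = p.drop 0 ++ p.take 0 := by simp
        rw [← heq, hs]
        exact hmem

theorem pathsLoop_all (si : List (List Int)) (sol : List (List Int)) (f : Int)
    (h : sol.all (fun p => anyInput (p ++ p) si) = true) :
    pathsLoop si f sol = f + sol.length := by
  induction sol generalizing f with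
  | nil => simp [pathsLoop]
  | cons p rest ih =>
    simp only [List.all_cons, Bool.and_eq_true] at h
    simp only [pathsLoop, h.1, if_true]
    rw [ih (f + 1) h.2]
    simp only [List.length_cons]
    push_cast
    ring

theorem pathsLoop_lt (si : List (List Int)) (sol : List (List Int)) (f : Int)
    (h : sol.all (fun p => anyInput (p ++ p) si) = false) :
    pathsLoop si f sol < f + sol.length := by
  induction sol generalizing f with
  | nil => simp at h
  | cons p rest ih =>
    simp only [List.all_cons, Bool.and_eq_false_iff] at h
    simp only [pathsLoop]
    rcases h with h | h
    · rw [Bool.eq_false_iff] at h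
      simp only [h]
      simp
    · by_cases hp : anyInput (p ++ p) si = true
      · simp only [hp, if_true]
        have := ih (f + 1) h
        simp only [List.length_cons] at *
        push_cast at *
        omega
      · rw [Bool.not_eq_true] at hp
        simp only [hp]
        simp

theorem pathsLoop_eq_all (si : List (List Int)) (sol : List (List Int)) :
    (pathsLoop si 0 sol == (sol.length : Int)) = sol.all (fun p => anyInput (p ++ p) si) := by
  rcases Bool.eq_false_or_eq_true (sol.all fun p => anyInput (p ++ p) si) with h | h
  · rw [h, beq_iff_eq]
    have := pathsLoop_all si sol 0 h
    omega
  · rw [h, beq_eq_false_iff_ne]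
    have := pathsLoop_lt si sol 0 h
    omega

theorem solsLoop_eq_any (si : List (List Int)) (pop : List (List (List Int))) :
    solsLoop si pop = pop.any (fun sol => sol.all (fun p => matchedB (PySem.Set.ofList si) p)) := by
  induction pop with
  | nil => simp [solsLoop]
  | cons sol rest ih =>
    simp only [solsLoop, List.any_cons]
    rw [pathsLoop_eq_all]
    simp only [anyInput_eq_matchedB]
    rcases Bool.eq_false_or_eq_true (sol.all fun p => matchedB (PySem.Set.ofList si) p) with h | h
    all_goals simp [h, ih]

-- ===== VERDICT (by name: the statement is the Claim_ definition above) =====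
theorem solution_duplicated_OLD_spec : Claim_equal_solution_duplicated_OLD := by
  intro population solution_input _
  unfold Spec_solution_duplicated_OLD solution_duplicated_OLD solution_duplicated_OLD_alt
  exact solsLoop_eq_any solution_input population
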